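-- pv_equiv track=rewrite | github.com/hendrikmeersseman/informatica5 | 09 - strings/05 - Alfabetische woorden.py | positie_laagste_ascii
-- ===== SOURCE A (Python) =====
-- def positie_laagste_ascii(tekst):
--     laagst = ord(tekst[0])
--     positie = 0
--     for i in range(1, len(tekst)):
--         rang = ord(tekst[i])
--         if rang < laagst:
--             laagst = rang
--             positie = i
--     return positie
-- ===== SOURCE B (Python) =====
-- def positie_laagste_ascii(tekst):
--     return tekst.index(min(tekst))
-- ===== Notes on version B (the rewrite author's own statement) =====
-- stated objective: idiomatic
-- what changed: Replaced the manual min-tracking loop over ord values with the idiomatic two-stage tekst.index(min(tekst)); Pre_ excludes the empty string, on which both A (IndexError) and B (ValueError) raise.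
import Mathlib
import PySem

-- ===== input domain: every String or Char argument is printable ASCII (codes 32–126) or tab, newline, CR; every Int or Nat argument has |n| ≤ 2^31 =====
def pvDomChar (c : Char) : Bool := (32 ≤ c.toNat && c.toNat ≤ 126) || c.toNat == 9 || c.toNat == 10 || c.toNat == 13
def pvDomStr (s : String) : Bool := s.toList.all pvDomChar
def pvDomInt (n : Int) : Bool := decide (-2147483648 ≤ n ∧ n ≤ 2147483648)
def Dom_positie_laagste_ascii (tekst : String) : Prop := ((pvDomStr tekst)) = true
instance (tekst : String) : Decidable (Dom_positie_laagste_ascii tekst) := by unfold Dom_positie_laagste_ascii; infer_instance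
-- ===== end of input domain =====

-- ===== PORT A =====
-- B replaces A's manual min-tracking loop with min + first index (idiomatic); return values proved equal on nonempty strings.

-- A's for-loop over range(1, len(tekst)): structural recursion over the tail,
-- carrying the running index i and the state (laagst, positie).
def pvLoopA : List Char → Int → Nat → Int → Int
  | [], _, _, positie => positie
  | c :: rest, i, laagst, positie =>
    let rang := c.toNat
    if rang < laagst then pvLoopA rest (i + 1) rang i
    else pvLoopA rest (i + 1) laagst positie

def positie_laagste_ascii (tekst : String) : Int :=
  match tekst.toList with
  | [] => 0  -- unreachable under Pre_ (Python raises IndexError on tekst[0])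
  | c :: rest => pvLoopA rest 1 c.toNat 0

-- ===== PORT B =====
def positie_laagste_ascii_alt (tekst : String) : Int :=
  match PySem.List.min? tekst.toList (fun c => c) with
  | none => 0  -- unreachable under Pre_ (Python min raises ValueError on '')
  | some m => ((PySem.List.index? tekst.toList m).getD 0 : Nat)

-- ===== PRECONDITION & SPEC =====
-- A raises IndexError on the empty string (tekst[0]); B raises ValueError there (min of empty).
def Pre_positie_laagste_ascii (tekst : String) : Prop := tekst ≠ ""
instance (tekst : String) : Decidable (Pre_positie_laagste_ascii tekst) := by
  unfold Pre_positie_laagste_ascii; infer_instance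
def pvWitness_positie_laagste_ascii : String := "ba"

def Spec_positie_laagste_ascii (tekst : String) (out : Int) : Prop := out = positie_laagste_ascii_alt tekst
instance (tekst : String) (out : Int) : Decidable (Spec_positie_laagste_ascii tekst out) := by unfold Spec_positie_laagste_ascii; infer_instance

-- ===== CLAIM (what is proved, stated in full; the proofs are below) =====
def Claim_equal_positie_laagste_ascii : Prop := ∀ (tekst : String), Dom_positie_laagste_ascii tekst → Pre_positie_laagste_ascii tekst → Spec_positie_laagste_ascii tekst (positie_laagste_ascii tekst)

-- ===== LEMMAS AND PROOFS =====

theorem char_le_iff (c d : Char) : c ≤ d ↔ c.toNat ≤ d.toNat := Iff.rfl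
theorem char_lt_iff (c d : Char) : c < d ↔ c.toNat < d.toNat := Iff.rfl

theorem char_ne_of_toNat_lt {m c : Char} (h : m.toNat < c.toNat) : c ≠ m := by
  intro he; rw [he] at h; exact lt_irrefl _ h

theorem foldl_min_comm (t : List Char) (a b : Char) :
    t.foldl min (min a b) = min a (t.foldl min b) := by
  induction t generalizing b with
  | nil => rfl
  | cons x xs ih => simp only [List.foldl]; rw [min_assoc]; exact ih (min b x)

theorem min?_cons_char (c : Char) (rest : List Char) :
    PySem.List.min? (c :: rest) (fun x => x) =
      some (match PySem.List.min? rest (fun x => x) with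
            | none => c
            | some m => if m < c then m else c) := by
  cases rest with
  | nil =>
    rw [PySem.List.min?_id_cons,
      (PySem.List.min?_eq_none_iff _ _).mpr (rfl : ([] : List Char) = [])]
    rfl
  | cons r rs =>
    rw [PySem.List.min?_id_cons, PySem.List.min?_id_cons]
    have h1 : (r :: rs).foldl min c = min c (rs.foldl min r) := by
      simp only [List.foldl]; exact foldl_min_comm rs c r
    rw [h1, min_def]
    show _ = some (if rs.foldl min r < c then rs.foldl min r else c)
    by_cases h : rs.foldl min r < c
    · rw [if_neg (not_le.mpr h), if_pos h]
    · rw [if_pos (not_lt.mp h), if_neg h]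

theorem loopA_spec (cs : List Char) :
    ∀ (i positie : Int) (laagst : Nat),
    pvLoopA cs i laagst positie =
      match PySem.List.min? cs (fun c => c) with
      | none => positie
      | some m =>
        if m.toNat < laagst then
          i + (((PySem.List.index? cs m).getD 0 : Nat) : Int)
        else positie := by
  induction cs with
  | nil =>
    intro i positie laagst
    rw [(PySem.List.min?_eq_none_iff _ _).mpr (rfl : ([] : List Char) = [])]
    rfl
  | cons c rest ih =>
    intro i positie laagst
    rw [min?_cons_char]
    cases hm : PySem.List.min? rest (fun x => x) with
    | none =>
      have hrest : rest = [] := (PySem.List.min?_eq_none_iff _ _).mp hm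
      subst hrest
      simp only [pvLoopA]
      split_ifs with hc
      · simp
      · simp
    | some m =>
      have hmem : m ∈ rest := PySem.List.min?_mem hm
      obtain ⟨k0, hk0⟩ : ∃ k, PySem.List.index? rest m = some k :=
        Option.isSome_iff_exists.mp ((PySem.List.index?_isSome_iff _ _).mpr hmem)
      simp only [pvLoopA]
      rw [ih, ih, hm]
      simp only [hk0, Option.getD_some]
      by_cases h2 : m.toNat < c.toNat
      · have hM : (if m < c then m else c) = m := if_pos ((char_lt_iff m c).mpr h2)
        rw [hM, PySem.List.index?_cons_of_ne rest (char_ne_of_toNat_lt h2), hk0]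
        simp only [Option.map_some, Option.getD_some]
        by_cases hc : c.toNat < laagst
        · rw [if_pos hc, if_pos h2, if_pos (Nat.lt_trans h2 hc)]; push_cast; ring
        · rw [if_neg hc]
          by_cases h3 : m.toNat < laagst
          · rw [if_pos h3, if_pos h3]; push_cast; ring
          · rw [if_neg h3, if_neg h3]
      · have hM : (if m < c then m else c) = c := if_neg (fun h => h2 ((char_lt_iff m c).mp h))
        rw [hM, PySem.List.index?_cons_self]
        simp only [Option.getD_some, Nat.cast_zero, add_zero]
        by_cases hc : c.toNat < laagst
        · rw [if_pos hc, if_neg h2, if_pos hc]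
        · have h3 : ¬ m.toNat < laagst := by omega
          rw [if_neg hc, if_neg h3, if_neg hc]

theorem toList_eq_nil_iff (s : String) : s.toList = [] ↔ s = "" := by
  constructor
  · intro h
    have h2 := congrArg String.ofList h
    rwa [String.ofList_toList] at h2
  · intro h; subst h; rfl

-- ===== VERDICT (by name: the statement is the Claim_ definition above) =====
theorem positie_laagste_ascii_spec : Claim_equal_positie_laagste_ascii := by
  intro tekst _ hpre
  unfold Spec_positie_laagste_ascii positie_laagste_ascii positie_laagste_ascii_alt
  cases h : tekst.toList with
  | nil => exact absurd ((toList_eq_nil_iff tekst).mp h) hpre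
  | cons c rest =>
    simp only []
    have step : pvLoopA rest 1 c.toNat 0 = pvLoopA (c :: rest) 0 (c.toNat + 1) 0 := by
      simp [pvLoopA]
    rw [step, loopA_spec]
    cases hM : PySem.List.min? (c :: rest) (fun x => x) with
    | none => exact absurd ((PySem.List.min?_eq_none_iff _ _).mp hM) (by simp)
    | some M =>
      have hle : M.toNat ≤ c.toNat := (char_le_iff M c).mp (PySem.List.min?_isMin hM c List.mem_cons_self)
      simp only []
      rw [if_pos (show M.toNat < c.toNat + 1 by omega)]
      simp
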